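-- pv_equiv track=rewrite | github.com/saartanel/iti0102-2019 | kt2/exam.py | g_happy
-- ===== SOURCE A (Python) =====
-- def g_happy(s):
--     """
--     We'll say that a lowercase 'g' in a string is "happy" if there is another 'g' immediately to its left or right.
--
--     Return True if all the g's in the given string are happy.
--
--     g_happy("xxggxx") => True
--     g_happy("xxgxx") => False
--     g_happy("xxggyygxx") => False
--     """
--     if not s:
--         return True
--     if len(s) < 2:
--         return False
--     for i in range(len(s)):
--         if s[i] == "g":
--             if i == 0:
--                 if s[i + 1] != "g":
--                     return False
--             elif i == len(s) - 1:
--                 if s[i - 1] != "g":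
--                     return False
--             else:
--                 if s[i + 1] != "g" and s[i - 1] != "g":
--                     return False
--     return True
-- ===== SOURCE B (Python) =====
-- def g_happy(s):
--     # Single pass tracking the current run of equal characters; a maximal run
--     # of 'g' of length exactly 1 is unhappy.
--     # Intentional difference from the original: a length-1 string with no 'g' is True.
--     prev = None
--     run = 0
--     for ch in s:
--         if ch == prev:
--             run += 1
--         else:
--             if prev == 'g' and run == 1:
--                 return False
--             prev = ch
--             run = 1
--     return not (prev == 'g' and run == 1)
-- ===== Notes on version B (the rewrite author's own statement) =====
-- stated objective: simpler
-- what changed: Replaced the per-index left/right-neighbor test with boundary branches by a single run-length scan over maximal runs of equal characters (fail iff a run of 'g' has length 1), which also drops the wrong len<2 guard.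
-- intended difference: On length-1 strings other than "g" (e.g. "x") A returns False although the string contains no 'g', because its len(s)<2 guard fires; B returns True, the intended vacuous truth of 'all g's are happy'. — e.g. on g_happy("x"): A returns false, B returns true
import Mathlib
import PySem

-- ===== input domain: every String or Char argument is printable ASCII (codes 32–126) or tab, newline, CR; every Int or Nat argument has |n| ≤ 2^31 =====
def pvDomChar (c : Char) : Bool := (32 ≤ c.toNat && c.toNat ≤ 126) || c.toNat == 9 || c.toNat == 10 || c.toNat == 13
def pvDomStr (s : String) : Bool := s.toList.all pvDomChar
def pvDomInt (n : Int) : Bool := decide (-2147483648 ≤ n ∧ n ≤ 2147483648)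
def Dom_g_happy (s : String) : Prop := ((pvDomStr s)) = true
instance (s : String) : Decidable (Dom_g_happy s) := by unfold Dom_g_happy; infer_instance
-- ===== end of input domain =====

-- B replaces A's per-index neighbor test by a single-pass run-length scan (prev char +
-- current run length), and returns the intended (vacuously true) value on length-1
-- strings without a 'g', where A wrongly returns False.

-- ===== PORT A =====
def g_happy (s : String) : Bool :=
  if PySem.Str.len s == 0 then true            -- `if not s: return True`
  else if PySem.Str.len s < 2 then false       -- `if len(s) < 2: return False`
  else
    (PySem.List.pyRange 0 (PySem.Str.len s) 1).all fun i =>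
      if PySem.Str.pyGet? s i == some 'g' then
        if i == 0 then PySem.Str.pyGet? s (i + 1) == some 'g'
        else if i == PySem.Str.len s - 1 then PySem.Str.pyGet? s (i - 1) == some 'g'
        else !(PySem.Str.pyGet? s (i + 1) != some 'g' && PySem.Str.pyGet? s (i - 1) != some 'g')
      else true

-- ===== PORT B =====
-- Source B's `for ch in s` loop, carrying `prev` (None before the first char) and `run`
def gLoop (prev : Option Char) (run : Nat) : List Char → Bool
  | [] => !(prev == some 'g' && run == 1)      -- `return not (prev == 'g' and run == 1)`
  | ch :: rest =>
      if some ch == prev then gLoop prev (run + 1) rest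
      else if prev == some 'g' && run == 1 then false
      else gLoop (some ch) 1 rest

def g_happy_alt (s : String) : Bool := gLoop none 0 s.toList

-- ===== PRECONDITION & SPEC =====
-- On length-1 strings other than "g" A returns False although the string has no 'g'
-- (its len(s)<2 guard fires); B returns True, the intended vacuous truth.
def D_g_happy (s : String) : Prop := s.toList.length = 1 ∧ s ≠ "g"
instance (s : String) : Decidable (D_g_happy s) := by unfold D_g_happy; infer_instance

def Spec_g_happy (s : String) (out : Bool) : Prop := ¬ D_g_happy s → out = g_happy_alt s
instance (s : String) (out : Bool) : Decidable (Spec_g_happy s out) := by unfold Spec_g_happy; infer_instance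

def pvDiffWitness_g_happy : String := "x"
def pvDiffWitnessOut_g_happy : Bool × Bool := (false, true)

-- ===== CLAIM (what is proved, stated in full; the proofs are below) =====
def Claim_unchanged_g_happy : Prop := ∀ (s : String), Dom_g_happy s → Spec_g_happy s (g_happy s)
def Claim_changed_g_happy : Prop := Dom_g_happy (pvDiffWitness_g_happy) ∧ D_g_happy (pvDiffWitness_g_happy) ∧ g_happy (pvDiffWitness_g_happy) = pvDiffWitnessOut_g_happy.1 ∧ g_happy_alt (pvDiffWitness_g_happy) = pvDiffWitnessOut_g_happy.2 ∧ pvDiffWitnessOut_g_happy.1 ≠ pvDiffWitnessOut_g_happy.2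
def Claim_exact_g_happy : Prop := ∀ (s : String), Dom_g_happy s → D_g_happy s → g_happy s ≠ g_happy_alt s

-- ===== LEMMAS AND PROOFS =====

-- middle form shared by both proofs: left-to-right scan carrying "previous char was 'g'"
def gAux (pg : Bool) : List Char → Bool
  | [] => true
  | c :: rest =>
      ((!(c == 'g')) || pg || (rest.head? == some 'g')) && gAux (c == 'g') rest

-- B's state (prev = c, run ≥ 1) in terms of gAux: the current run is still open,
-- so its check is pending (first factor), and the tail is scanned with flag c='g'
theorem gLoop_eq_gAux (l : List Char) : ∀ (c : Char) (run : Nat), 1 ≤ run →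
    gLoop (some c) run l
      = (((!(c == 'g')) || decide (2 ≤ run) || (l.head? == some 'g')) && gAux (c == 'g') l) := by
  induction l with
  | nil =>
    intro c run h1
    by_cases hc : (c == 'g') = true
    · have : c = 'g' := eq_of_beq hc
      subst this
      rcases Nat.lt_or_ge run 2 with h | h
      · have : run = 1 := by omega
        subst this
        simp [gLoop, gAux]
      · have h2 : decide (2 ≤ run) = true := by simpa using h
        have hne : (run == 1) = false := by simp; omega
        simp [gLoop, gAux, hne, h2]
    · have hcb : (c == 'g') = false := Bool.eq_false_iff.mpr hc
      simp [gLoop, gAux, hcb]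
  | cons x xs ih =>
    intro c run h1
    by_cases hx : x = c
    · subst hx
      rw [gLoop]
      simp only [beq_self_eq_true, reduceIte]
      rw [ih x (run + 1) (by omega)]
      have h2 : decide (2 ≤ run + 1) = true := by simpa using h1
      by_cases hc : (x == 'g') = true
      · have hxg : x = 'g' := eq_of_beq hc
        subst hxg
        simp [gAux, h1]
      · have hcb : (x == 'g') = false := Bool.eq_false_iff.mpr hc
        simp [gAux, hcb]
    · have hxc : ((some x == some c) : Bool) = false := by simp [hx]
      rw [gLoop]
      simp only [hxc, Bool.false_eq_true, if_false]
      by_cases hgr : ((some c == some 'g' && run == 1) : Bool) = true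
      · rw [if_pos hgr]
        rcases Bool.and_eq_true_iff.mp hgr with ⟨hcg', hr'⟩
        have hcg : c = 'g' := by
          have : (c == 'g') = true := by simpa using hcg'
          exact eq_of_beq this
        have hr : run = 1 := by simpa using hr'
        subst hcg hr
        have hxg : (x == 'g') = false := by
          cases h' : x == 'g'
          · rfl
          · exact absurd (eq_of_beq h') hx
        simp [hxg]
      · rw [if_neg (by simpa using hgr)]
        have hgr' : ¬ (c = 'g' ∧ run = 1) := by
          intro ⟨h1', h2'⟩
          exact hgr (by simp [h1', h2'])
        rw [ih x 1 (by omega)]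
        have hF1 : ((!(c == 'g')) || decide (2 ≤ run) || ((x :: xs).head? == some 'g')) = true := by
          by_cases hc : c = 'g'
          · have hr : run ≠ 1 := fun h => hgr' ⟨hc, h⟩
            have : decide (2 ≤ run) = true := by simp; omega
            simp [this]
          · have : (c == 'g') = false := by
              cases h' : c == 'g'
              · rfl
              · exact absurd (eq_of_beq h') hc
            simp [this]
        rw [gAux, hF1, Bool.true_and]
        by_cases hxg : x = 'g'
        · subst hxg
          have hcg : (c == 'g') = false := by
            cases h' : c == 'g'
            · rfl
            · exact absurd (eq_of_beq h').symm hx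
          simp [hcg]
        · have hxg' : (x == 'g') = false := by
            cases h' : x == 'g'
            · rfl
            · exact absurd (eq_of_beq h') hxg
          simp [hxg']

-- B equals the prev-flag scan started fresh
theorem alt_eq_gAux (l : List Char) : gLoop none 0 l = gAux false l := by
  cases l with
  | nil => rfl
  | cons c rest =>
    rw [gLoop]
    simp only [show ((some c : Option Char) == none) = false from rfl,
      show ((none : Option Char) == some 'g' && (0 == 1 : Bool)) = false from rfl,
      Bool.false_eq_true, if_false]
    rw [gLoop_eq_gAux rest c 1 (by omega), gAux]
    simp

-- index form of the scan condition (over Nat indices, with defaults)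
def okAt (pg : Bool) (l : List Char) (i : Nat) : Bool :=
  (!(l[i]?.getD ' ' == 'g')) || (if i == 0 then pg else l[i-1]?.getD ' ' == 'g')
    || (l[i+1]?.getD ' ' == 'g')

theorem okAt_shift (pg : Bool) (c : Char) (rest : List Char) (i : Nat) :
    okAt pg (c :: rest) (i + 1) = okAt (c == 'g') rest i := by
  cases i with
  | zero => cases rest <;> rfl
  | succ j => rfl

theorem gAux_eq_range_all (l : List Char) : ∀ pg : Bool,
    gAux pg l = (List.range l.length).all (okAt pg l) := by
  induction l with
  | nil => intro pg; rfl
  | cons c rest ih =>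
    intro pg
    rw [gAux, ih (c == 'g')]
    simp only [List.length_cons, List.range_succ_eq_map, List.all_cons, List.all_map]
    have h0 : okAt pg (c :: rest) 0
        = ((!(c == 'g')) || pg || (rest.head? == some 'g')) := by
      cases rest <;> rfl
    rw [h0]
    congr 1
    exact List.all_congr rfl fun i => (okAt_shift pg c rest i).symm

-- option-compare vs getD-compare on list indexing
theorem getQ (l : List Char) (j : Nat) :
    ((l[j]? == some 'g') : Bool) = (l[j]?.getD ' ' == 'g') := by
  rcases l[j]? with _ | x <;> rfl

theorem getQne (l : List Char) (j : Nat) :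
    ((l[j]? != some 'g') : Bool) = !(l[j]?.getD ' ' == 'g') := by
  rcases l[j]? with _ | x <;> rfl

-- A's loop body at a valid index i equals okAt false l i
theorem key (l : List Char) (i : Nat) (hi' : i < l.length) :
    (if PySem.List.pyGet? l ((0:Int) + i) == some 'g' then
        if ((0:Int) + i) == 0 then PySem.List.pyGet? l (((0:Int) + i) + 1) == some 'g'
        else if ((0:Int) + i) == (l.length : Int) - 1 then PySem.List.pyGet? l (((0:Int) + i) - 1) == some 'g'
        else !(PySem.List.pyGet? l (((0:Int) + i) + 1) != some 'g' && PySem.List.pyGet? l (((0:Int) + i) - 1) != some 'g')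
      else true) = okAt false l i := by
  have e0 : (0 : Int) + (i : Int) = (i : Int) := by ring
  have e1 : (i : Int) + 1 = ((i + 1 : Nat) : Int) := by push_cast; ring
  simp only [e0, e1, PySem.List.pyGet?_natCast, getQ]
  by_cases hc : l[i]?.getD ' ' = 'g'
  · simp only [hc, beq_self_eq_true, reduceIte]
    by_cases h0 : i = 0
    · subst h0
      simp [okAt]
      try exact fun h => absurd hc h
    · have h0i : ((i : Int) == 0) = false := by simp; omega
      have h0n : (i == 0) = false := by simp [h0]
      have em1 : (i : Int) - 1 = ((i - 1 : Nat) : Int) := by omega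
      simp only [h0i, Bool.false_eq_true, if_false, em1, PySem.List.pyGet?_natCast, getQ, getQne]
      by_cases hlast : i = l.length - 1
      · have hli : ((i : Int) == (l.length : Int) - 1) = true := by simp; omega
        have hnext : l[i+1]? = none := by apply List.getElem?_eq_none; omega
        simp [hli, okAt, hnext, h0n]
        try exact fun h => absurd hc h
      · have hli : ((i : Int) == (l.length : Int) - 1) = false := by simp; omega
        simp only [hli, Bool.false_eq_true, if_false, okAt, h0n]
        cases hp : (l[i-1]?.getD ' ' == 'g') <;> cases hq : (l[i+1]?.getD ' ' == 'g') <;>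
          simp_all
  · have hc' : (l[i]?.getD ' ' == 'g') = false := by simpa using hc
    simp [hc', okAt]

-- A's pyRange loop agrees with the index form of the scan
theorem A_all_eq_range_all (l : List Char) :
    ((PySem.List.pyRange 0 (l.length : Int) 1).all fun i =>
      if PySem.List.pyGet? l i == some 'g' then
        if i == 0 then PySem.List.pyGet? l (i + 1) == some 'g'
        else if i == (l.length : Int) - 1 then PySem.List.pyGet? l (i - 1) == some 'g'
        else !(PySem.List.pyGet? l (i + 1) != some 'g' && PySem.List.pyGet? l (i - 1) != some 'g')
      else true)
    = (List.range l.length).all (okAt false l) := by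
  rw [PySem.List.pyRange_one]
  simp only [sub_zero, Int.toNat_natCast, List.all_map]
  rw [Bool.eq_iff_iff]
  simp only [List.all_eq_true, Function.comp_apply]
  refine forall₂_congr fun i hi => ?_
  rw [key l i (List.mem_range.mp hi)]

-- from a singleton toList to the literal string
theorem eq_g_of_singleton (s : String) (h : s.toList = ['g']) : s = "g" := by
  have : s.toList = ("g" : String).toList := by simpa using h
  exact String.toList_inj.mp this

-- length-1 strings: A gives false
theorem A_false_of_len_one (s : String) (h : s.toList.length = 1) : g_happy s = false := by
  rw [g_happy]
  have h1 : PySem.Str.len s = 1 := by rw [PySem.Str.len_eq, h]; rfl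
  simp only [h1]
  norm_num

-- main agreement outside D_
theorem main_unchanged (s : String) (hD : ¬ D_g_happy s) : g_happy s = g_happy_alt s := by
  rcases hn : s.toList.length with _ | _ | n
  · -- empty
    have hs : s.toList = [] := List.eq_nil_of_length_eq_zero hn
    rw [g_happy, g_happy_alt, hs]
    have h0 : PySem.Str.len s = 0 := by rw [PySem.Str.len_eq, hn]; rfl
    simp only [h0]
    simp [gLoop]
  · -- length 1: ¬D_ forces s = "g"
    have hg : s = "g" := by
      by_contra hne
      exact hD ⟨hn, hne⟩
    subst hg
    decide
  · -- length ≥ 2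
    rw [g_happy, g_happy_alt]
    have hl : PySem.Str.len s = (s.toList.length : Int) := PySem.Str.len_eq s
    have h0 : (PySem.Str.len s == 0) = false := by
      rw [hl]
      simp only [beq_eq_false_iff_ne, ne_eq, Int.natCast_eq_zero]
      omega
    have h2 : ¬ (PySem.Str.len s < 2) := by rw [hl]; omega
    simp only [h0, Bool.false_eq_true, if_false, if_neg h2]
    rw [alt_eq_gAux, gAux_eq_range_all]
    rw [← A_all_eq_range_all s.toList]
    rw [hl]
    exact List.all_congr rfl fun i => rfl

-- ===== VERDICT (by name: the statement is the Claim_ definition above) =====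
theorem g_happy_spec : Claim_unchanged_g_happy := by
  intro s _ hD
  exact main_unchanged s hD

theorem g_happy_changed : Claim_changed_g_happy := by
  unfold Claim_changed_g_happy; decide

theorem g_happy_tight : Claim_exact_g_happy := by
  intro s _ hD
  rcases hD with ⟨h1, hne⟩
  have hA : g_happy s = false := A_false_of_len_one s h1
  rcases hc : s.toList with _ | ⟨c, rest⟩
  · simp [hc] at h1
  · have hrest : rest = [] := by
      rw [hc] at h1
      simp at h1
      exact h1
    subst hrest
    have hcg : (c == 'g') = false := by
      cases h : c == 'g'
      · rfl
      · exact absurd (eq_g_of_singleton s (by rw [hc, eq_of_beq h])) hne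
    have hB : g_happy_alt s = true := by
      rw [g_happy_alt, hc, gLoop]
      simp [gLoop, hcg]
    rw [hA, hB]
    simp
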